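-- pv_equiv track=rewrite | github.com/yogthos/text-style-transfer | src/validator/critic.py | _group_similar_issues
-- ===== SOURCE A (Python) =====
-- from typing import Dict, List, Optional, Tuple, Set, TYPE_CHECKING
--
-- def _group_similar_issues(issues: List[str]) -> Dict[str, List[str]]:
--     """Group similar issues together.
--
--     Args:
--         issues: List of issue strings.
--
--     Returns:
--         Dictionary mapping canonical issue to list of similar variations.
--     """
--     issue_groups: Dict[str, List[str]] = {}
--
--     for issue in issues:
--         issue_lower = issue.lower()
--         matched = False
--
--         # Check if this issue is similar to any existing group
--         for canonical, variations in issue_groups.items():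
--             canonical_lower = canonical.lower()
--
--             # Simple similarity check: shared keywords
--             issue_words = set(issue_lower.split())
--             canonical_words = set(canonical_lower.split())
--
--             # If they share significant words, group them
--             common_words = issue_words & canonical_words
--             # Remove common stop words
--             stop_words = {'the', 'a', 'an', 'and', 'or', 'but', 'to', 'of', 'in', 'on', 'at', 'for', 'with'}
--             common_words -= stop_words
--
--             if len(common_words) >= 2 or (len(common_words) == 1 and len(issue_words) <= 3):
--                 issue_groups[canonical].append(issue)
--                 matched = True
--                 break
--
--         if not matched:
--             # Create new group with this issue as canonical
--             issue_groups[issue] = [issue]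
--
--     return issue_groups
-- ===== SOURCE B (Python) =====
-- STOP_WORDS = {'the', 'a', 'an', 'and', 'or', 'but', 'to', 'of', 'in', 'on', 'at', 'for', 'with'}
--
-- def _group_similar_issues(issues):
--     """Group similar issues via an inverted word->canonical index (one pass,
--     no rescan of all existing groups per issue)."""
--     groups = {}          # canonical -> variations
--     pos = {}             # canonical -> insertion position
--     index = {}           # significant word -> list of canonicals containing it
--     for issue in issues:
--         distinct = list(dict.fromkeys(issue.lower().split()))
--         sig = [w for w in distinct if w not in STOP_WORDS]
--         threshold = 1 if len(distinct) <= 3 else 2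
--         counts = {}
--         for w in sig:
--             for c in index.get(w, ()):
--                 counts[c] = counts.get(c, 0) + 1
--         best = None
--         for c, k in counts.items():
--             if k >= threshold and (best is None or pos[c] < pos[best]):
--                 best = c
--         if best is not None:
--             groups[best].append(issue)
--         else:
--             if issue not in groups:
--                 pos[issue] = len(pos)
--                 for w in sig:
--                     index.setdefault(w, []).append(issue)
--             groups[issue] = [issue]
--     return groups
-- ===== Notes on version B (the rewrite author's own statement) =====
-- stated objective: faster
-- what changed: Replaces the per-issue rescan of every existing group (recomputing lowercase/split/set-intersection against each canonical) with an inverted word-to-canonical index built once: each issue tallies shared significant words only for canonicals that actually share a word, then picks the earliest-inserted canonical meeting the threshold.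
import Mathlib
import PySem

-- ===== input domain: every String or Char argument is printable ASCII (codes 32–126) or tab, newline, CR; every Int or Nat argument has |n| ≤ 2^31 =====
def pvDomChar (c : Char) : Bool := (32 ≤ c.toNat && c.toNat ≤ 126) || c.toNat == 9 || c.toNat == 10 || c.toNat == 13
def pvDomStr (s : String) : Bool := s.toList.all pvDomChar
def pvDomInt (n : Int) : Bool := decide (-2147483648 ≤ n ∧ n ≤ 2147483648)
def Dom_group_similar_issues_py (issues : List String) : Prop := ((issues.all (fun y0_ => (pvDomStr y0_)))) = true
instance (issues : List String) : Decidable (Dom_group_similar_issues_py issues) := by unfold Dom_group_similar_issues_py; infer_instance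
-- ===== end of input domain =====

-- B replaces A's per-issue rescan of all existing groups with an inverted word->canonical index
-- (one tally pass per issue over only the canonicals sharing a significant word): faster, same return value.

-- the stop-word set literal of A (shared constant of the module)
def pvStop : List String := ["the", "a", "an", "and", "or", "but", "to", "of", "in", "on", "at", "for", "with"]

-- ===== PORT A =====
-- the inner similarity test of A's canonical loop
def pvCondA (issue canonical : String) : Bool :=
  let issue_words : PySem.Set String := PySem.Set.ofList (PySem.Str.split₀ (PySem.Str.lower issue))
  let canonical_words : PySem.Set String := PySem.Set.ofList (PySem.Str.split₀ (PySem.Str.lower canonical))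
  let common := PySem.Set.diff (PySem.Set.inter issue_words canonical_words) pvStop
  decide (2 ≤ PySem.Set.len common) || (PySem.Set.len common == 1 && decide (PySem.Set.len issue_words ≤ 3))

-- 'for canonical, variations in issue_groups.items(): … break' — first canonical matching, if any
def pvFindA (issue : String) : List (String × List String) → Option String
  | [] => none
  | (c, _) :: rest => if pvCondA issue c then some c else pvFindA issue rest

-- one iteration of A's outer loop
def pvStepA (g : PySem.Dict String (List String)) (issue : String) : PySem.Dict String (List String) :=
  match pvFindA issue g.items with
  | some c => g.modify c [] (fun vs => vs ++ [issue])
  | none => g.insert issue [issue]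

def group_similar_issues_py (issues : List String) : List (String × List String) :=
  (issues.foldl pvStepA PySem.Dict.empty).items

-- ===== PORT B =====
-- B's loop-body locals (distinct/sig, threshold, counts, best), as named helpers
def pvSigB (issue : String) : List String :=
  (PySem.List.dedup (PySem.Str.split₀ (PySem.Str.lower issue))).filter (fun w => !pvStop.contains w)

def pvThrB (issue : String) : Int :=
  if (PySem.List.dedup (PySem.Str.split₀ (PySem.Str.lower issue))).length ≤ 3 then 1 else 2

-- counts: for each significant word, bump every canonical listed in the inverted index
def pvCountsB (idx : PySem.Dict String (List String)) (issue : String) : PySem.Dict String Int :=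
  (pvSigB issue).foldl (fun cnt w =>
    (idx.getD w []).foldl (fun cnt c => cnt.modify c 0 (· + 1)) cnt) PySem.Dict.empty

-- best: earliest-inserted canonical whose tally meets the threshold
def pvBestB (pos : PySem.Dict String Int) (idx : PySem.Dict String (List String))
    (issue : String) : Option String :=
  (pvCountsB idx issue).items.foldl (fun best p =>
    if pvThrB issue ≤ p.2 then
      match best with
      | none => some p.1
      | some b => if pos.getD p.1 0 < pos.getD b 0 then some p.1 else best
    else best) none

-- one iteration of B's loop over (groups, pos, index)
def pvStepB
    (st : PySem.Dict String (List String) × PySem.Dict String Int × PySem.Dict String (List String))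
    (issue : String) :
    PySem.Dict String (List String) × PySem.Dict String Int × PySem.Dict String (List String) :=
  let groups := st.1
  let pos := st.2.1
  let index := st.2.2
  match pvBestB pos index issue with
  | some c => (groups.modify c [] (fun vs => vs ++ [issue]), pos, index)
  | none =>
    if groups.contains issue then
      (groups.insert issue [issue], pos, index)
    else
      (groups.insert issue [issue],
       pos.insert issue (pos.size : Int),
       (pvSigB issue).foldl (fun idx w => idx.insert w (idx.getD w [] ++ [issue])) index)

def group_similar_issues_py_alt (issues : List String) : List (String × List String) :=
  (issues.foldl pvStepB (PySem.Dict.empty, PySem.Dict.empty, PySem.Dict.empty)).1.items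

-- ===== PRECONDITION & SPEC =====
def Spec_group_similar_issues_py (issues : List String) (out : List (String × List String)) : Prop := out = group_similar_issues_py_alt issues
instance (issues : List String) (out : List (String × List String)) : Decidable (Spec_group_similar_issues_py issues out) := by unfold Spec_group_similar_issues_py; infer_instance

-- ===== CLAIM (what is proved, stated in full; the proofs are below) =====
def Claim_equal_group_similar_issues_py : Prop := ∀ (issues : List String), Dom_group_similar_issues_py issues → Spec_group_similar_issues_py issues (group_similar_issues_py issues)

-- ===== LEMMAS AND PROOFS =====

def pvWords (s : String) : List String := PySem.Str.split₀ (PySem.Str.lower s)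
def pvShared (i c : String) : Nat := ((pvSigB i).filter (fun w => (pvSigB c).contains w)).length

lemma pv_filter_swap (A B : List String) :
    (A.filter (fun w => !pvStop.contains w)).filter
        (fun w => ((B.filter (fun w => !pvStop.contains w)).contains w)) =
    (A.filter (fun w => B.contains w)).filter (fun w => !pvStop.contains w) := by
  rw [List.filter_filter, List.filter_filter]
  apply List.filter_congr
  intro w _
  rcases hs : pvStop.contains w with _|_ <;>
    simp_all [List.mem_filter]

lemma pv_bool_arith (n m : Nat) :
    (decide ((2 : Int) ≤ (n : Int)) || ((n : Int) == (1 : Int) && decide ((m : Int) ≤ 3))) =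
      decide ((if m ≤ 3 then (1 : Int) else 2) ≤ (n : Int)) := by
  rw [Bool.eq_iff_iff]
  simp only [Bool.or_eq_true, Bool.and_eq_true, decide_eq_true_eq, beq_iff_eq]
  by_cases h : m ≤ 3 <;> simp [h] <;> omega

set_option maxHeartbeats 2000000 in
lemma pv_cond_iff (i c : String) : pvCondA i c = decide (pvThrB i ≤ (pvShared i c : Int)) := by
  have hlen : pvShared i c =
      ((PySem.Set.inter (PySem.List.dedup (pvWords i)) (PySem.List.dedup (pvWords c))).filter
        (fun w => !pvStop.contains w)).length := by
    unfold pvShared pvSigB pvWords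
    rw [pv_filter_swap]; rfl
  have hdiff : ∀ (s t : List String), PySem.Set.diff s t = s.filter (fun x => !t.contains x) := fun _ _ => rfl
  have hinter : ∀ (s t : List String), PySem.Set.inter s t = s.filter (fun x => t.contains x) := fun _ _ => rfl
  have hlen2 : ∀ (s : List String), PySem.Set.len s = s.length := fun _ => rfl
  simp only [pvCondA, pvWords, pvThrB, PySem.List.dedup_eq_ofList, hdiff, hinter, hlen2] at hlen ⊢
  rw [← hlen]
  exact pv_bool_arith _ _

lemma pv_findA_eq (issue : String) : ∀ l : List (String × List String),
    pvFindA issue l = (l.map Prod.fst).find? (pvCondA issue)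
  | [] => rfl
  | (c, v) :: rest => by
    simp only [pvFindA, List.map_cons]
    rcases h : pvCondA issue c with _|_
    · rw [if_neg (by simp [h]), List.find?_cons_of_neg (by simp [h]), pv_findA_eq issue rest]
    · rw [if_pos (by simp [h]), List.find?_cons_of_pos h]

lemma pv_idx_fold (x : String) : ∀ (ws : List String) (idx : PySem.Dict String (List String)),
    ws.Nodup →
    ∀ w, ((ws.foldl (fun idx w => idx.insert w (idx.getD w [] ++ [x])) idx).getD w []) =
      if w ∈ ws then idx.getD w [] ++ [x] else idx.getD w []
  | [], idx, _, w => by simp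
  | w0 :: ws, idx, h, w => by
    simp only [List.foldl_cons]
    rw [pv_idx_fold x ws _ (List.nodup_cons.mp h).2 w]
    by_cases hw : w = w0
    · subst hw
      rw [if_neg (List.nodup_cons.mp h).1, if_pos (List.mem_cons_self), PySem.Dict.getD_insert_self]
    · rw [PySem.Dict.getD_insert_of_ne _ _ _ hw]
      by_cases hm : w ∈ ws
      · rw [if_pos hm, if_pos (List.mem_cons_of_mem _ hm)]
      · rw [if_neg hm, if_neg (by simp [hw, hm])]

lemma pv_count_L (keys : List String) (hnd : keys.Nodup) (c : String) :
    ∀ ws : List String,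
    ((ws.flatMap (fun w => keys.filter (fun k => (pvSigB k).contains w))).count c) =
      if c ∈ keys then (ws.filter (fun w => (pvSigB c).contains w)).length else 0
  | [] => by simp
  | w :: ws => by
    rw [List.flatMap_cons, List.count_append, pv_count_L keys hnd c ws]
    rcases hp : (pvSigB c).contains w with _|_
    · rw [List.filter_cons_of_neg (by simpa using hp)]
      have : (keys.filter (fun k => (pvSigB k).contains w)).count c = 0 := by
        rw [List.count_eq_zero]
        intro hmem
        rw [List.mem_filter] at hmem
        exact absurd (by simpa using hmem.2 : w ∈ pvSigB c) (by simpa using hp)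
      rw [this]; simp
    · rw [List.filter_cons_of_pos (by simpa using hp)]
      by_cases hm : c ∈ keys
      · rw [if_pos hm, if_pos hm, List.count_filter (by simpa using hp),
          List.count_eq_one_of_mem hnd hm]
        simp [Nat.add_comm]
      · rw [if_neg hm, if_neg hm]
        have : (keys.filter (fun k => (pvSigB k).contains w)).count c = 0 := by
          rw [List.count_eq_zero]
          intro hmem
          exact hm (List.mem_of_mem_filter hmem)
        rw [this]

def pvSelStep (posOf : String → Int) (sat : String → Prop) [DecidablePred sat]
    (best : Option String) (c : String) : Option String :=
  if sat c then (match best with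
    | none => some c
    | some b => if posOf c < posOf b then some c else best) else best

lemma pv_foldMin (posOf : String → Int) (sat : String → Prop) [DecidablePred sat] :
    ∀ (T : List String) (acc : Option String),
    (T.foldl (pvSelStep posOf sat) acc = none →
      acc.toList ++ T.filter (fun c => decide (sat c)) = []) ∧
    (∀ b, T.foldl (pvSelStep posOf sat) acc = some b →
      b ∈ acc.toList ++ T.filter (fun c => decide (sat c)) ∧
      ∀ c ∈ acc.toList ++ T.filter (fun c => decide (sat c)), posOf b ≤ posOf c)
  | [], acc => by
    constructor
    · intro h; simp [List.foldl_nil] at h; simp [h]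
    · intro b h; simp [List.foldl_nil] at h; simp [h]
  | c :: T, acc => by
    have hT := pv_foldMin posOf sat T (pvSelStep posOf sat acc c)
    simp only [List.foldl_cons]
    by_cases hs : sat c
    · rw [List.filter_cons_of_pos (by simpa using hs)]
      cases acc with
      | none =>
        rw [show pvSelStep posOf sat none c = some c from by simp [pvSelStep, hs]] at hT ⊢
        constructor
        · intro h; have := hT.1 h; simp at this
        · intro b h
          obtain ⟨hmem, hmin⟩ := hT.2 b h
          refine ⟨by simpa using hmem, ?_⟩
          intro d hd
          exact hmin d (by simpa using hd)
      | some a =>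
        by_cases hlt : posOf c < posOf a
        · rw [show pvSelStep posOf sat (some a) c = some c from by
            simp [pvSelStep, hs, hlt]] at hT ⊢
          constructor
          · intro h; have := hT.1 h; simp at this
          · intro b h
            obtain ⟨hmem, hmin⟩ := hT.2 b h
            constructor
            · simp only [Option.toList_some, List.cons_append, List.nil_append, List.mem_cons] at hmem ⊢
              tauto
            · intro d hd
              simp only [Option.toList_some, List.cons_append, List.nil_append, List.mem_cons] at hd
              rcases hd with rfl | rfl | hd
              · have h1 := hmin c (by simp)
                omega
              · exact hmin d (by simp)
              · exact hmin d (by simp [hd])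
        · rw [show pvSelStep posOf sat (some a) c = some a from by
            simp [pvSelStep, hs, hlt]] at hT ⊢
          constructor
          · intro h; have := hT.1 h; simp at this
          · intro b h
            obtain ⟨hmem, hmin⟩ := hT.2 b h
            constructor
            · simp only [Option.toList_some, List.cons_append, List.nil_append, List.mem_cons] at hmem ⊢
              tauto
            · intro d hd
              simp only [Option.toList_some, List.cons_append, List.nil_append, List.mem_cons] at hd
              rcases hd with rfl | rfl | hd
              · exact hmin d (by simp)
              · have h1 := hmin a (by simp)
                omega
              · exact hmin d (by simp [hd])
    · rw [List.filter_cons_of_neg (by simpa using hs)]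
      rw [show pvSelStep posOf sat acc c = acc from by simp [pvSelStep, hs]] at hT ⊢
      exact hT

def pvInv (g : PySem.Dict String (List String)) (pos : PySem.Dict String Int)
    (idx : PySem.Dict String (List String)) : Prop :=
  g.keys.Nodup ∧ pos.keys = g.keys ∧
  (∀ (i : Nat) (h : i < g.keys.length), pos.getD g.keys[i] 0 = (i : Int)) ∧
  (∀ w, idx.getD w [] = g.keys.filter (fun c => (pvSigB c).contains w))

lemma pv_thr_ge_one (issue : String) : 1 ≤ pvThrB issue := by
  unfold pvThrB; split <;> omega

lemma pv_sigB_nodup (issue : String) : (pvSigB issue).Nodup :=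
  (PySem.List.nodup_dedup _).filter _

lemma pv_keys_insert_contains {ν : Type} (d : PySem.Dict String ν) (k : String) (v : ν)
    (h : d.contains k = true) : (d.insert k v).keys = d.keys := by
  show (d.insert k v).items.map Prod.fst = d.items.map Prod.fst
  rw [PySem.Dict.items_insert_of_contains d v h, List.map_map]
  apply List.map_congr_left
  intro p _
  rcases hb : p.1 == k with _|_
  · simp [ne_of_beq_false hb]
  · simp [eq_of_beq hb]

lemma pv_keys_modify_contains {ν : Type} (d : PySem.Dict String ν) (k : String) (d0 : ν)
    (f : ν → ν) (h : d.contains k = true) : (d.modify k d0 f).keys = d.keys := by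
  rw [PySem.Dict.keys_modify, pv_keys_insert_contains _ _ _ h]

lemma pv_best_char (g : PySem.Dict String (List String)) (pos : PySem.Dict String Int)
    (idx : PySem.Dict String (List String)) (issue : String)
    (hnd : g.keys.Nodup)
    (hpos : ∀ (i : Nat) (h : i < g.keys.length), pos.getD g.keys[i] 0 = (i : Int))
    (hidx : ∀ w, idx.getD w [] = g.keys.filter (fun c => (pvSigB c).contains w)) :
    pvBestB pos idx issue = pvFindA issue g.items := by
  set L := (pvSigB issue).flatMap (fun w => idx.getD w []) with hLdef
  have hcounts : pvCountsB idx issue = PySem.Dict.counter L := by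
    rw [PySem.Dict.counter_eq_foldl, hLdef, List.foldl_flatMap]
    rfl
  have hcnt : ∀ c, L.count c = if c ∈ g.keys then pvShared issue c else 0 := by
    intro c
    have hLL : L = (pvSigB issue).flatMap (fun w => g.keys.filter (fun k => (pvSigB k).contains w)) := by
      simp only [hLdef, hidx]
    rw [hLL, pv_count_L g.keys hnd c (pvSigB issue)]
    rfl
  have hbfold : pvBestB pos idx issue =
      (PySem.Set.ofList L).foldl
        (pvSelStep (fun c => pos.getD c 0) (fun c => pvThrB issue ≤ (L.count c : Int))) none := by
    unfold pvBestB
    rw [hcounts, PySem.Dict.items_counter L, List.foldl_map]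
    rfl
  have hfa : pvFindA issue g.items = g.keys.find? (pvCondA issue) := pv_findA_eq issue g.items
  have hfm := pv_foldMin (fun c => pos.getD c 0) (fun c => pvThrB issue ≤ (L.count c : Int))
      (PySem.Set.ofList L) none
  have hsatc : ∀ c ∈ g.keys, ((pvThrB issue ≤ (L.count c : Int)) ↔ pvCondA issue c = true) := by
    intro c hc
    rw [pv_cond_iff issue c, decide_eq_true_iff, hcnt c, if_pos hc]
  have hmemT : ∀ c, c ∈ PySem.Set.ofList L ↔ (c ∈ g.keys ∧ 1 ≤ pvShared issue c) := by
    intro c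
    rw [PySem.Set.mem_ofList, ← List.count_pos_iff, hcnt c]
    by_cases hc : c ∈ g.keys <;> simp [hc] <;> omega
  rw [hbfold, hfa]
  rcases hres : g.keys.find? (pvCondA issue) with _ | c0
  · rcases hr : (PySem.Set.ofList L).foldl
        (pvSelStep (fun c => pos.getD c 0) (fun c => pvThrB issue ≤ (L.count c : Int))) none with _ | b
    · rfl
    · exfalso
      obtain ⟨hbmem, _⟩ := (hfm.2 b) hr
      simp only [Option.toList_none, List.nil_append, List.mem_filter, decide_eq_true_eq] at hbmem
      obtain ⟨hbT, hbsat⟩ := hbmem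
      have hbk : b ∈ g.keys := ((hmemT b).mp hbT).1
      exact absurd ((hsatc b hbk).mp hbsat) (by simpa using List.find?_eq_none.mp hres b hbk)
  · obtain ⟨hcond0, as, bs, hsplit, hnotas⟩ := List.find?_eq_some_iff_append.mp hres
    have hlen : g.keys.length = as.length + (bs.length + 1) := by
      rw [hsplit]; simp
    have hasl : as.length < g.keys.length := by omega
    have hc0 : g.keys[as.length]'hasl = c0 := by
      have := List.getElem_of_eq hsplit hasl
      rw [this, List.getElem_append_right (le_refl _)]
      simp
    have hc0mem : c0 ∈ g.keys := by rw [hsplit]; simp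
    have hshared0 : pvThrB issue ≤ (pvShared issue c0 : Int) := by
      have := (pv_cond_iff issue c0) ▸ hcond0
      rw [decide_eq_true_iff] at this
      exact this
    have hone : 1 ≤ pvShared issue c0 := by
      have h1 := pv_thr_ge_one issue
      omega
    have hc0T : c0 ∈ PySem.Set.ofList L := (hmemT c0).mpr ⟨hc0mem, hone⟩
    have hc0sat : pvThrB issue ≤ (L.count c0 : Int) := by
      rw [hcnt c0, if_pos hc0mem]; exact hshared0
    have hc0filt : c0 ∈ (PySem.Set.ofList L).filter
        (fun c => decide (pvThrB issue ≤ (L.count c : Int))) := by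
      rw [List.mem_filter]
      exact ⟨hc0T, decide_eq_true hc0sat⟩
    rcases hr : (PySem.Set.ofList L).foldl
        (pvSelStep (fun c => pos.getD c 0) (fun c => pvThrB issue ≤ (L.count c : Int))) none with _ | b
    · exfalso
      have := hfm.1 hr
      simp only [Option.toList_none, List.nil_append] at this
      rw [this] at hc0filt
      exact absurd hc0filt (List.not_mem_nil)
    · obtain ⟨hbmem, hbmin⟩ := (hfm.2 b) hr
      simp only [Option.toList_none, List.nil_append, List.mem_filter, decide_eq_true_eq] at hbmem
      obtain ⟨hbT, hbsat⟩ := hbmem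
      have hbk : b ∈ g.keys := ((hmemT b).mp hbT).1
      have hbcond : pvCondA issue b = true := (hsatc b hbk).mp hbsat
      obtain ⟨j, hj, hbj⟩ := List.mem_iff_getElem.mp hbk
      have hposb : pos.getD b 0 = (j : Int) := by rw [← hbj]; exact hpos j hj
      have hposc0 : pos.getD c0 0 = (as.length : Int) := by rw [← hc0]; exact hpos as.length hasl
      have hle := hbmin c0 (by simpa only [Option.toList_none, List.nil_append] using hc0filt)
      simp only [hposb, hposc0] at hle
      have hjle : j ≤ as.length := by exact_mod_cast hle
      have hjeq : j = as.length := by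
        rcases Nat.lt_or_ge j as.length with hlt | hge
        · exfalso
          have hbas : b ∈ as := by
            have h1 := List.getElem_of_eq hsplit hj
            rw [List.getElem_append_left hlt] at h1
            rw [← hbj, h1]
            exact as.getElem_mem hlt
          have := hnotas b hbas
          simp [hbcond] at this
        · omega
      subst hjeq
      rw [← hbj, ← hc0]

lemma pv_step (g : PySem.Dict String (List String)) (pos : PySem.Dict String Int)
    (idx : PySem.Dict String (List String)) (issue : String) (h : pvInv g pos idx) :
    ∃ pos' idx', pvStepB (g, pos, idx) issue = (pvStepA g issue, pos', idx') ∧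
      pvInv (pvStepA g issue) pos' idx' := by
  obtain ⟨hnd, hpk, hpos, hidx⟩ := h
  have hbest : pvBestB pos idx issue = pvFindA issue g.items :=
    pv_best_char g pos idx issue hnd hpos hidx
  rcases hfind : pvFindA issue g.items with _ | c
  · rw [hfind] at hbest
    rcases hc : g.contains issue with _|_
    · -- fresh canonical
      have hmem : issue ∉ g.keys := by
        rw [PySem.Dict.contains_eq_decide_mem_keys] at hc
        simpa using hc
      have hkeys : (g.insert issue [issue]).keys = g.keys ++ [issue] := by
        show (g.insert issue [issue]).items.map Prod.fst = _
        rw [PySem.Dict.items_insert_of_not_contains _ _ hc]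
        simp [PySem.Dict.keys]
      have hpc : pos.contains issue = false := by
        rw [PySem.Dict.contains_eq_decide_mem_keys, hpk]
        simpa using hmem
      refine ⟨pos.insert issue (pos.size : Int),
        (pvSigB issue).foldl (fun idx w => idx.insert w (idx.getD w [] ++ [issue])) idx,
        by simp [pvStepB, pvStepA, hbest, hfind, hc], ?_⟩
      simp only [pvStepA, hfind]
      have hsz : pos.size = g.keys.length := by
        rw [← hpk]
        show pos.items.length = (pos.items.map Prod.fst).length
        simp
      refine ⟨?_, ?_, ?_, ?_⟩
      · rw [hkeys]
        simp [List.nodup_append, hnd]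
        exact fun b hb he => hmem (he ▸ hb)
      · show (pos.insert issue (pos.size : Int)).items.map Prod.fst = _
        rw [PySem.Dict.items_insert_of_not_contains _ _ hpc, hkeys, List.map_append, ← hpk]
        rfl
      · intro i hilen
        have hilen' : i < (g.keys ++ [issue]).length := by
          rw [← hkeys]; exact hilen
        have hgi : (g.insert issue [issue]).keys[i]'hilen = (g.keys ++ [issue])[i]'hilen' :=
          List.getElem_of_eq hkeys hilen
        rw [hgi]
        simp only [List.length_append, List.length_cons, List.length_nil] at hilen'
        by_cases hi : i < g.keys.length
        · rw [List.getElem_append_left hi,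
            PySem.Dict.getD_insert_of_ne _ _ _ (fun he => hmem (by rw [← he]; exact g.keys.getElem_mem hi))]
          exact hpos i hi
        · have : i = g.keys.length := by omega
          subst this
          rw [List.getElem_append_right (le_refl _)]
          simp [PySem.Dict.getD_insert_self, hsz]
      · intro w
        rw [pv_idx_fold issue (pvSigB issue) idx (pv_sigB_nodup issue) w, hkeys, hidx w,
          List.filter_append]
        by_cases hw : w ∈ pvSigB issue
        · rw [if_pos hw]
          simp [hw]
        · rw [if_neg hw]
          simp [hw]
    · -- overwrite of an existing canonical
      refine ⟨pos, idx, by simp [pvStepB, pvStepA, hbest, hfind, hc], ?_⟩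
      have hkeys : (g.insert issue [issue]).keys = g.keys :=
        pv_keys_insert_contains _ _ _ hc
      simp only [pvStepA, hfind]
      exact ⟨hkeys ▸ hnd, hkeys ▸ hpk, by rw [hkeys]; exact hpos, by rw [hkeys]; exact hidx⟩
  · -- matched: append to group c
    rw [hfind] at hbest
    have hcmem : c ∈ g.keys := by
      have := pv_findA_eq issue g.items
      rw [hfind] at this
      exact List.mem_of_find?_eq_some this.symm
    have hc : g.contains c = true := by
      rw [PySem.Dict.contains_eq_decide_mem_keys]; simpa using hcmem
    refine ⟨pos, idx, by simp [pvStepB, pvStepA, hbest, hfind], ?_⟩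
    have hkeys : (g.modify c [] (fun vs => vs ++ [issue])).keys = g.keys :=
      pv_keys_modify_contains _ _ _ _ hc
    simp only [pvStepA, hfind]
    exact ⟨hkeys ▸ hnd, hkeys ▸ hpk, by rw [hkeys]; exact hpos, by rw [hkeys]; exact hidx⟩

lemma pv_loop : ∀ (issues : List String) (g : PySem.Dict String (List String))
    (pos : PySem.Dict String Int) (idx : PySem.Dict String (List String)),
    pvInv g pos idx →
    (issues.foldl pvStepB (g, pos, idx)).1 = issues.foldl pvStepA g
  | [], _, _, _, _ => rfl
  | issue :: issues, g, pos, idx, h => by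
    obtain ⟨pos', idx', hstep, hinv⟩ := pv_step g pos idx issue h
    rw [List.foldl_cons, List.foldl_cons, hstep]
    exact pv_loop issues _ pos' idx' hinv

lemma pv_inv_init : pvInv PySem.Dict.empty PySem.Dict.empty PySem.Dict.empty := by
  refine ⟨?_, rfl, ?_, ?_⟩
  · show (List.map Prod.fst ([] : List (String × List String))).Nodup
    simp
  · intro i h
    have h0 : (PySem.Dict.empty : PySem.Dict String (List String)).keys.length = 0 := rfl
    omega
  · intro w
    rfl

theorem pv_main : ∀ (issues : List String), group_similar_issues_py issues = group_similar_issues_py_alt issues := by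
  intro issues
  unfold group_similar_issues_py group_similar_issues_py_alt
  rw [pv_loop issues _ _ _ pv_inv_init]

-- ===== VERDICT (by name: the statement is the Claim_ definition above) =====
theorem group_similar_issues_py_spec : Claim_equal_group_similar_issues_py := by
  intro issues _
  unfold Spec_group_similar_issues_py
  exact pv_main issues
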